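-- pv_equiv track=rewrite | github.com/BradMcDanel/term-quantization | util.py | cycle_time
-- ===== SOURCE A (Python) =====
-- import math
--
-- def cycle_time(stationary_mat, piped_mat, sa_size):
--     '''
--     Computes systolic array cycle time (does not include possible I/O cost).
--     Bit-parallel computation assumed.
--     '''
--     sw, sh = stationary_mat
--     pw, ph = piped_mat
--
--     assert pw == sw, 'stationary and piped width must match. Got {} and {}.'.format(sw, pw)
--
--     cycles = 0
--     num_tiles = math.ceil(sw / sa_size) * math.ceil(sh / sa_size)
--     for _ in range(num_tiles):
--         # weight loading (sa_size) + data loading (ph) + skew (sa_size*2)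
--         cycles += sa_size + ph + sa_size*2
--
--     return cycles
-- ===== SOURCE B (Python) =====
-- def cycle_time(stationary_mat, piped_mat, sa_size):
--     '''
--     Computes systolic array cycle time (does not include possible I/O cost).
--     Bit-parallel computation assumed.
--     '''
--     sw, sh = stationary_mat
--     pw, ph = piped_mat
--
--     assert pw == sw, 'stationary and piped width must match. Got {} and {}.'.format(sw, pw)
--
--     def tiles(dim):
--         # exact integer ceiling division, no floats
--         q, r = divmod(dim, sa_size)
--         return q + 1 if r else q
--
--     n = tiles(sw) * tiles(sh)
--     # each tile costs sa_size (weight load) + ph (data load) + sa_size*2 (skew)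
--     return n * (3 * sa_size + ph) if n > 0 else 0
-- ===== Notes on version B (the rewrite author's own statement) =====
-- stated objective: faster
-- what changed: Replaces the per-tile accumulation loop and float-based math.ceil with an integer divmod tile count and a single closed-form multiplication guarded by n > 0.
import Mathlib
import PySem

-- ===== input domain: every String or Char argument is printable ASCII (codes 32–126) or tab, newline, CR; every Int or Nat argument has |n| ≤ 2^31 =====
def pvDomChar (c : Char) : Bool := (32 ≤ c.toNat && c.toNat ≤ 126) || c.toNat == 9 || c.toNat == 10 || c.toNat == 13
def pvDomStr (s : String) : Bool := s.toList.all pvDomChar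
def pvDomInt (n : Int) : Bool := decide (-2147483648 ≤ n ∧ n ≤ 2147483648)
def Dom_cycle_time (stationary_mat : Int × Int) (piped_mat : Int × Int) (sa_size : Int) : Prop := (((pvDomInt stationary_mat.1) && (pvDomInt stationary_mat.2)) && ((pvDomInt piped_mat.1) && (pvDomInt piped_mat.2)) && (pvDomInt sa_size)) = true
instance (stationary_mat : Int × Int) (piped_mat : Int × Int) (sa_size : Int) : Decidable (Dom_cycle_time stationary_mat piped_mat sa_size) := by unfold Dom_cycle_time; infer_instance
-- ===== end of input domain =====

-- B replaces the per-tile accumulation loop and the float math.ceil by an integer divmod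
-- tile count and one closed-form multiplication guarded by n > 0 (O(1) instead of O(num_tiles)).
-- On the domain |n| ≤ 2^31, math.ceil(x / y) equals exact integer ceiling division -((-x) // y).

-- ===== PORT A =====
def cycle_time (stationary_mat : Int × Int) (piped_mat : Int × Int) (sa_size : Int) : Int :=
  let sw := stationary_mat.1
  let sh := stationary_mat.2
  let _pw := piped_mat.1
  let ph := piped_mat.2
  -- 'assert pw == sw' and division by zero are handled by Pre_
  let num_tiles : Int :=
    (-(PySem.Int.floordiv (-sw) sa_size)) * (-(PySem.Int.floordiv (-sh) sa_size))
  (PySem.List.pyRange 0 num_tiles 1).foldl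
    (fun cycles _ => cycles + (sa_size + ph + sa_size * 2)) 0

-- ===== PORT B =====
-- integer ceiling division via divmod: q + 1 if the remainder is nonzero, else q
def pvTiles (sa_size dim : Int) : Int :=
  let q := PySem.Int.floordiv dim sa_size
  let r := PySem.Int.mod dim sa_size
  if r ≠ 0 then q + 1 else q

def cycle_time_alt (stationary_mat : Int × Int) (piped_mat : Int × Int) (sa_size : Int) : Int :=
  let n := pvTiles sa_size stationary_mat.1 * pvTiles sa_size stationary_mat.2
  if n > 0 then n * (3 * sa_size + piped_mat.2) else 0

-- ===== PRECONDITION & SPEC =====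
-- Pre_ excludes exactly the inputs where A raises: pw ≠ sw (AssertionError) and sa_size = 0 (ZeroDivisionError).
def Pre_cycle_time (stationary_mat : Int × Int) (piped_mat : Int × Int) (sa_size : Int) : Prop :=
  piped_mat.1 = stationary_mat.1 ∧ sa_size ≠ 0
instance (stationary_mat : Int × Int) (piped_mat : Int × Int) (sa_size : Int) : Decidable (Pre_cycle_time stationary_mat piped_mat sa_size) := by unfold Pre_cycle_time; infer_instance

def pvWitness_cycle_time : (Int × Int) × (Int × Int) × Int := ((4, 4), (4, 3), 2)

def Spec_cycle_time (stationary_mat : Int × Int) (piped_mat : Int × Int) (sa_size : Int) (out : Int) : Prop := out = cycle_time_alt stationary_mat piped_mat sa_size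
instance (stationary_mat : Int × Int) (piped_mat : Int × Int) (sa_size : Int) (out : Int) : Decidable (Spec_cycle_time stationary_mat piped_mat sa_size out) := by unfold Spec_cycle_time; infer_instance

-- ===== CLAIM (what is proved, stated in full; the proofs are below) =====
def Claim_equal_cycle_time : Prop := ∀ (stationary_mat : Int × Int) (piped_mat : Int × Int) (sa_size : Int), Dom_cycle_time stationary_mat piped_mat sa_size → Pre_cycle_time stationary_mat piped_mat sa_size → Spec_cycle_time stationary_mat piped_mat sa_size (cycle_time stationary_mat piped_mat sa_size)

-- ===== LEMMAS AND PROOFS =====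

-- folding a constant addition over any list adds length * k
theorem foldl_const_add (l : List Int) (k c : Int) :
    l.foldl (fun cycles _ => cycles + k) c = c + l.length * k := by
  induction l generalizing c with
  | nil => simp
  | cons x xs ih => simp [List.foldl, ih]; ring

-- divmod-based ceiling equals -((-x) // s)
theorem pvTiles_eq_ceil (s x : Int) (hs : s ≠ 0) :
    pvTiles s x = -(PySem.Int.floordiv (-x) s) := by
  have h1 := PySem.Int.floordiv_mul_add_mod x s
  have h2 := PySem.Int.floordiv_mul_add_mod (-x) s
  set q := PySem.Int.floordiv x s with hq
  set r := PySem.Int.mod x s with hr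
  set q' := PySem.Int.floordiv (-x) s with hq'
  set r' := PySem.Int.mod (-x) s with hr'
  have hsum : (q + q') * s = -(r + r') := by ring_nf; linarith [add_mul q q' s]
  rcases lt_or_gt_of_ne hs with hneg | hpos
  · obtain ⟨hb1, hb2⟩ := PySem.Int.mod_neg_bounds x hneg
    obtain ⟨hb3, hb4⟩ := PySem.Int.mod_neg_bounds (-x) hneg
    have ht : q + q' = 0 ∨ q + q' = -1 := by
      rcases lt_trichotomy (q + q') (-1) with h | h | h
      · exfalso; nlinarith
      · right; exact h
      · left
        have : q + q' < 1 := by by_contra hc; push Not at hc; nlinarith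
        omega
    rcases ht with ht | ht
    · have hr0 : r = 0 ∧ r' = 0 := by
        have : r + r' = 0 := by rw [ht] at hsum; simp at hsum; omega
        omega
      simp [pvTiles, ← hq, ← hr, hr0.1]
      omega
    · have hrs : r + r' = s := by rw [ht] at hsum; linarith [hsum]
      have hrne : r ≠ 0 := by intro h0; omega
      simp [pvTiles, ← hq, ← hr, hrne]
      omega
  · obtain ⟨hb1, hb2⟩ := And.intro (PySem.Int.mod_nonneg x hpos) (PySem.Int.mod_lt x hpos)
    obtain ⟨hb3, hb4⟩ := And.intro (PySem.Int.mod_nonneg (-x) hpos) (PySem.Int.mod_lt (-x) hpos)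
    have ht : q + q' = 0 ∨ q + q' = -1 := by
      rcases lt_trichotomy (q + q') (-1) with h | h | h
      · exfalso; nlinarith
      · right; exact h
      · left
        have : q + q' < 1 := by by_contra hc; push Not at hc; nlinarith
        omega
    rcases ht with ht | ht
    · have hr0 : r = 0 ∧ r' = 0 := by
        have : r + r' = 0 := by rw [ht] at hsum; simp at hsum; omega
        omega
      simp [pvTiles, ← hq, ← hr, hr0.1]
      omega
    · have hrs : r + r' = s := by rw [ht] at hsum; linarith [hsum]
      have hrne : r ≠ 0 := by intro h0; omega
      simp [pvTiles, ← hq, ← hr, hrne]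
      omega

-- ===== VERDICT (by name: the statement is the Claim_ definition above) =====
theorem cycle_time_spec : Claim_equal_cycle_time := by
  intro sm pm s _hdom hpre
  unfold Spec_cycle_time cycle_time cycle_time_alt
  rw [pvTiles_eq_ceil s sm.1 hpre.2, pvTiles_eq_ceil s sm.2 hpre.2]
  rw [foldl_const_add, PySem.List.length_pyRange_one]
  set N : Int := (-(PySem.Int.floordiv (-sm.1) s)) * (-(PySem.Int.floordiv (-sm.2) s)) with hN
  by_cases h : N ≤ 0
  · rw [if_neg (by omega)]
    simp
    left; exact h
  · rw [if_pos (show N > 0 by omega)]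
    have : ((N - 0).toNat : Int) = N := by omega
    rw [this]; ring
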